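-- pv_equiv track=rewrite | github.com/noa-blenkitny/python-projects | textPreProcessor.py | remove_oov
-- ===== SOURCE A (Python) =====
-- def remove_oov(my_str, min_count, oov):
--     words = my_str.split(" ")
--     final_ans_list = []
--     word_count = {}
--     for w in words:
--         word_count[w] = word_count.get(w, 0) + 1
--     final_ans_list += [word if word_count[word] >= min_count else oov for word in words]
--     my_str = " ".join(final_ans_list)
--     return (my_str)
-- ===== SOURCE B (Python) =====
-- def remove_oov(my_str, min_count, oov):
--     # Sort-and-scan: sort the words, collect each run of equal words whose
--     # length is below min_count into a rare-word set, then rebuild the sentence.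
--     words = my_str.split(" ")
--     rare = []
--     prev = None
--     run = 0
--     for w in sorted(words):
--         if w == prev:
--             run += 1
--         else:
--             if prev is not None and run < min_count:
--                 rare.append(prev)
--             prev = w
--             run = 1
--     if prev is not None and run < min_count:
--         rare.append(prev)
--     rare = set(rare)
--     return " ".join(oov if w in rare else w for w in words)
-- ===== Notes on version B (the rewrite author's own statement) =====
-- stated objective: alternative
-- what changed: Replaces A's hash-map frequency counting with a sort-and-scan: B sorts the words, walks the sorted list once tracking (prev, run length) to collect runs shorter than min_count into a rare-word set, then rebuilds the sentence from that set.
import Mathlib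
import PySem

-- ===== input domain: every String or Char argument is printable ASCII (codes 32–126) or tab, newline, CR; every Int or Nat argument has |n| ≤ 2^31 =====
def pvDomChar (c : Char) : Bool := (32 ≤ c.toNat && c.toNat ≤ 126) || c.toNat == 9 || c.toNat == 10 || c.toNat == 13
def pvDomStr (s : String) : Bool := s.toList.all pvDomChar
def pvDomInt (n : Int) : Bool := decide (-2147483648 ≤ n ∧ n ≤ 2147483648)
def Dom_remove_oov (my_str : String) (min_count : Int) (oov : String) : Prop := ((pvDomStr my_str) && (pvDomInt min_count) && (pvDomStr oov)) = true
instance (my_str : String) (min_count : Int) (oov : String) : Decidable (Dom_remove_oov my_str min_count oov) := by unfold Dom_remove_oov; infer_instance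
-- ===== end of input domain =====

-- B drops A's frequency dict: it sorts the words, scans the sorted list once collecting
-- each run of equal words shorter than min_count into a rare-word set, and rebuilds the
-- sentence from that set; objective: alternative (sort-and-scan instead of hash counting).

-- ===== PORT A =====
def remove_oov (my_str : String) (min_count : Int) (oov : String) : String :=
  let words := (PySem.Str.split? my_str " ").getD []  -- sep is the nonempty literal " ", so split? is always some
  let final_ans_list : List String := []
  let word_count : PySem.Dict String Int :=
    words.foldl (fun d w => d.insert w (d.getD w 0 + 1)) PySem.Dict.empty
  -- word_count[word]: the key is always present (word ∈ words), so getD is exact here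
  let final_ans_list := final_ans_list ++
    words.map (fun word => if word_count.getD word 0 ≥ min_count then word else oov)
  PySem.Str.join " " final_ans_list

-- ===== PORT B =====
-- the body of Source B's for-loop over sorted(words), acting on the state (prev, run, rare)
def oovStep (min_count : Int) (st : Option String × Int × List String) (w : String) :
    Option String × Int × List String :=
  match st with
  | (prev, run, rare) =>
    if prev = some w then (prev, run + 1, rare)
    else (some w, 1,
      match prev with
      | some p => if run < min_count then rare ++ [p] else rare
      | none => rare)

-- the final 'if prev is not None and run < min_count: rare.append(prev)' after the loop
def oovFinish (min_count : Int) (st : Option String × Int × List String) : List String :=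
  match st with
  | (some p, run, rare) => if run < min_count then rare ++ [p] else rare
  | (none, _, rare) => rare

def remove_oov_alt (my_str : String) (min_count : Int) (oov : String) : String :=
  let words := (PySem.Str.split? my_str " ").getD []  -- sep is the nonempty literal " ", so split? is always some
  let st := (PySem.List.sorted words (fun w => w) false).foldl (oovStep min_count) (none, 0, [])
  let rare : PySem.Set String := PySem.Set.ofList (oovFinish min_count st)
  PySem.Str.join " " (words.map (fun w => if w ∈ rare then oov else w))

-- ===== PRECONDITION & SPEC =====
def Spec_remove_oov (my_str : String) (min_count : Int) (oov : String) (out : String) : Prop := out = remove_oov_alt my_str min_count oov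
instance (my_str : String) (min_count : Int) (oov : String) (out : String) : Decidable (Spec_remove_oov my_str min_count oov out) := by unfold Spec_remove_oov; infer_instance

-- ===== CLAIM (what is proved, stated in full; the proofs are below) =====
def Claim_equal_remove_oov : Prop := ∀ (my_str : String) (min_count : Int) (oov : String), Dom_remove_oov my_str min_count oov → Spec_remove_oov my_str min_count oov (remove_oov my_str min_count oov)

-- ===== LEMMAS AND PROOFS =====

theorem cnt_concat_ne (L : List String) (x y : String) (h : x ≠ y) :
    (L ++ [y]).count x = L.count x := by
  simp [List.count_append, Ne.symm h]

-- loop invariant on a sorted (Pairwise ≤) nonempty list l ++ [a]: after the fold,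
-- prev = the last word, run = its multiplicity, and rare holds exactly the finished
-- short runs (words ≠ a whose multiplicity is below min_count).
theorem oov_fold_state (m : Int) : ∀ (l : List String) (a : String),
    (l ++ [a]).Pairwise (· ≤ ·) →
    ∃ rare, (l ++ [a]).foldl (oovStep m) (none, 0, []) =
      (some a, ((l ++ [a]).count a : Int), rare) ∧
      ∀ x, x ∈ rare ↔ (x ∈ l ∧ x ≠ a ∧ ((l ++ [a]).count x : Int) < m) := by
  intro l
  induction l using List.reverseRecOn with
  | nil =>
    intro a hp
    exact ⟨[], by simp [oovStep], by simp⟩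
  | append_singleton l' b ih =>
    intro a hp
    have hpl : (l' ++ [b]).Pairwise (· ≤ ·) := (List.pairwise_append.1 hp).1
    have hle : ∀ x ∈ l' ++ [b], x ≤ a := fun x hx =>
      (List.pairwise_append.1 hp).2.2 x hx a (by simp)
    obtain ⟨rare, hfold, hmem⟩ := ih b hpl
    by_cases hba : b = a
    · subst hba
      refine ⟨rare, ?_, ?_⟩
      · rw [List.foldl_append, hfold]
        have : ((l' ++ [b]) ++ [b]).count b = (l' ++ [b]).count b + 1 := by
          simp [List.count_append]
        rw [this]
        simp only [oovStep, List.foldl_cons, List.foldl_nil]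
        push_cast; ring_nf
      · intro x
        by_cases hxb : x = b
        · subst hxb
          simp [hmem x]
        · have hc := cnt_concat_ne (l' ++ [b]) x b hxb
          rw [hmem x]
          constructor
          · rintro ⟨h1, _, h3⟩
            exact ⟨List.mem_append.2 (Or.inl h1), hxb, by rw [hc]; exact h3⟩
          · rintro ⟨h1, _, h3⟩
            have h1' : x ∈ l' := by
              rcases List.mem_append.1 h1 with h | h
              · exact h
              · exact absurd (by simpa using h) hxb
            exact ⟨h1', hxb, by rw [hc] at h3; exact h3⟩
    · -- b ≠ a : a starts a new run
      have hxb' : ∀ x ∈ l', x ≤ b := fun x hx =>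
        (List.pairwise_append.1 hpl).2.2 x hx b (by simp)
      have hna : a ∉ l' ++ [b] := by
        intro hmem'
        rcases List.mem_append.1 hmem' with h | h
        · exact hba (le_antisymm (hle b (by simp)) (hxb' a h))
        · exact hba ((by simpa using h) : a = b).symm
      have hcnt1 : ((l' ++ [b]) ++ [a]).count a = 1 := by
        rw [List.count_append, List.count_eq_zero_of_not_mem hna]; simp
      refine ⟨if ((l' ++ [b]).count b : Int) < m then rare ++ [b] else rare, ?_, ?_⟩
      · rw [List.foldl_append, hfold, hcnt1]
        have hne : (some b : Option String) ≠ some a := by simpa using hba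
        simp only [oovStep, List.foldl_cons, List.foldl_nil, if_neg hne]
        norm_num
      · intro x
        by_cases hxa : x = a
        · subst hxa
          have hnr : x ∉ rare := fun h => hna (List.mem_append.2 (Or.inl ((hmem x).1 h).1))
          have hnb : x ≠ b := fun h => hna (by simp [h])
          constructor
          · intro hx
            exfalso
            split at hx
            · rcases List.mem_append.1 hx with h | h
              · exact hnr h
              · exact hnb (by simpa using h)
            · exact hnr hx
          · rintro ⟨_, h, _⟩; exact absurd rfl h
        · have hc := cnt_concat_ne ((l' ++ [b])) x a hxa
          by_cases hxbb : x = b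
          · have hxmem : x ∈ l' ++ [b] := by simp [hxbb]
            have hnr : x ∉ rare := fun h => ((hmem x).1 h).2.1 hxbb
            have hcb : ((l' ++ [b]).count b : Int) = ((l' ++ [b]).count x : Int) := by rw [hxbb]
            constructor
            · intro hx
              split at hx
              · rename_i hlt
                rcases List.mem_append.1 hx with h | h
                · exact absurd h hnr
                · exact ⟨hxmem, hxa, by rw [hc, ← hcb]; exact hlt⟩
              · exact absurd hx hnr
            · rintro ⟨_, _, h3⟩
              rw [hc] at h3
              rw [if_pos (by rw [hcb]; exact h3)]
              simp [hxbb]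
          · have hmx := hmem x
            constructor
            · intro hx
              have hx' : x ∈ rare := by
                split at hx
                · rcases List.mem_append.1 hx with h | h
                  · exact h
                  · exact absurd (by simpa using h) hxbb
                · exact hx
              obtain ⟨h1, _, h3⟩ := hmx.1 hx'
              exact ⟨List.mem_append.2 (Or.inl h1), hxa, by rw [hc]; exact h3⟩
            · rintro ⟨h1, _, h3⟩
              have hx' : x ∈ l' := by
                rcases List.mem_append.1 h1 with h | h
                · exact h
                · exact absurd (by simpa using h) hxbb
              have : x ∈ rare := hmx.2 ⟨hx', hxbb, by rw [hc] at h3; exact h3⟩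
              split
              · exact List.mem_append.2 (Or.inl this)
              · exact this

-- membership in the finished rare list: exactly the words of the sorted list whose
-- multiplicity is below min_count
theorem oov_rare_mem (m : Int) (l : List String) (a : String)
    (hp : (l ++ [a]).Pairwise (· ≤ ·)) :
    ∀ x, x ∈ oovFinish m ((l ++ [a]).foldl (oovStep m) (none, 0, [])) ↔
      (x ∈ l ++ [a] ∧ ((l ++ [a]).count x : Int) < m) := by
  obtain ⟨rare, hf, hm⟩ := oov_fold_state m l a hp
  rw [hf]
  intro x
  show x ∈ (if ((l ++ [a]).count a : Int) < m then rare ++ [a] else rare) ↔ _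
  by_cases hxa : x = a
  · subst hxa
    have hnr : x ∉ rare := fun h => ((hm x).1 h).2.1 rfl
    split
    · rename_i hlt
      simp only [List.mem_append, List.mem_singleton]
      exact ⟨fun _ => ⟨by simp, hlt⟩, fun _ => by simp⟩
    · rename_i hlt
      exact ⟨fun h => absurd h hnr, fun ⟨_, h⟩ => absurd h hlt⟩
  · have hc := cnt_concat_ne l x a hxa
    have : x ∈ (if ((l ++ [a]).count a : Int) < m then rare ++ [a] else rare) ↔ x ∈ rare := by
      split
      · simp [hxa]
      · rfl
    rw [this, hm x]
    constructor
    · rintro ⟨h1, _, h3⟩; exact ⟨List.mem_append.2 (Or.inl h1), h3⟩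
    · rintro ⟨h1, h3⟩
      have : x ∈ l := by
        rcases List.mem_append.1 h1 with h | h
        · exact h
        · exact absurd (by simpa using h) hxa
      exact ⟨this, hxa, h3⟩

-- ===== VERDICT (by name: the statement is the Claim_ definition above) =====
theorem remove_oov_spec : Claim_equal_remove_oov := by
  intro my_str min_count oov _
  unfold Spec_remove_oov remove_oov remove_oov_alt
  simp only [List.nil_append, PySem.Dict.getD_foldl_insert_add_one, PySem.Dict.getD_empty,
    zero_add]
  set words := (PySem.Str.split? my_str " ").getD [] with hw
  congr 1
  apply List.map_congr_left
  intro w hwmem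
  set sw := PySem.List.sorted words (fun w => w) false with hsw
  have hperm : sw.Perm words := PySem.List.sorted_perm words (fun w => w) false
  have hpair : sw.Pairwise (· ≤ ·) := PySem.List.sorted_pairwise words (fun w => w)
  have hswne : sw ≠ [] := by
    rw [hsw, Ne, PySem.List.sorted_eq_nil_iff]
    intro h
    rw [h] at hwmem; exact absurd hwmem (List.not_mem_nil)
  obtain ⟨l, a, hla0⟩ := (sw.eq_nil_or_concat).resolve_left hswne
  have hla : sw = l ++ [a] := by rw [hla0, List.concat_eq_append]
  have hmemrare := oov_rare_mem min_count l a (hla ▸ hpair) w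
  rw [← hla] at hmemrare
  have hwsw : w ∈ sw := hperm.mem_iff.2 hwmem
  have hcnt : sw.count w = words.count w := hperm.count_eq w
  by_cases h : (words.count w : Int) < min_count
  · rw [if_neg (by omega), if_pos]
    rw [PySem.Set.mem_ofList, hmemrare, hla]
    exact ⟨hla ▸ hwsw, by rw [hla] at hcnt; rw [hcnt]; exact h⟩
  · rw [if_pos (by omega), if_neg]
    rw [PySem.Set.mem_ofList, hmemrare]
    rintro ⟨_, hlt⟩
    rw [hcnt] at hlt
    exact absurd hlt h
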